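-- pv_equiv track=rewrite | github.com/ddubab/algo-test | programmers/Level3/아이템 줍기.py | solution
-- ===== SOURCE A (Python) =====
-- from collections import deque
--
-- def solution(rectangle, characterX, characterY, itemX, itemY):
--     answer = 0
--
--     dx = [1,0,-1,0]
--     dy = [0,1,0,-1]
--     graph = [[-1 for _ in range(102)] for _ in range(102)]
--     q = deque()
--
--     for r in rectangle:
--         r1,c1,r2,c2 = map(lambda x:x*2,r)
--         for i in range(r1,r2+1):
--             for j in range(c1,c2+1):
--                 if r1 <i<r2 and c1<j<c2:
--                     graph[i][j] = 0
--                 elif graph[i][j] !=0: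
--                     graph[i][j] = 1
--
--     characterX,characterY = characterX*2,characterY*2
--     itemX,itemY = itemX*2,itemY*2
--
--     q.append([characterX,characterY,0])
--     visited = [[0 for _ in range(102)] for _ in range(102)]
--
--     while q:
--         x,y,c = q.popleft()
--         if x == itemX and y == itemY:
--             return c//2
--
--         visited[x][y] = 1
--
--         for i in range(4):
--             nx = x+dx[i]
--             ny = y+dy[i]
--
--             if visited[nx][ny] == 0 and graph[nx][ny] ==1:
--                 q.append([nx,ny,c+1])
-- ===== SOURCE B (Python) =====
-- def solution(rectangle, characterX, characterY, itemX, itemY):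
--     rects = [[v * 2 for v in r] for r in rectangle]
--
--     def cell(i, j):
--         if any(r1 < i < r2 and c1 < j < c2 for r1, c1, r2, c2 in rects):
--             return 0
--         if any(r1 <= i <= r2 and c1 <= j <= c2 for r1, c1, r2, c2 in rects):
--             return 1
--         return -1
--
--     graph = [[cell(i, j) for j in range(102)] for i in range(102)]
--
--     itemX, itemY = itemX * 2, itemY * 2
--     visited = [[0 for _ in range(102)] for _ in range(102)]
--     cur = [(characterX * 2, characterY * 2, 0)]
--     nxt = []
--     while cur or nxt:
--         if not cur:
--             cur, nxt = nxt, []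
--         x, y, c = cur.pop(0)
--         if x == itemX and y == itemY:
--             return c // 2
--         visited[x][y] = 1
--         for dx, dy in ((1, 0), (0, 1), (-1, 0), (0, -1)):
--             nx, ny = x + dx, y + dy
--             if visited[nx][ny] == 0 and graph[nx][ny] == 1:
--                 nxt.append((nx, ny, c + 1))
--     return None
-- ===== Notes on version B (the rewrite author's own statement) =====
-- stated objective: alternative
-- what changed: B replaces A's sequential per-rectangle area painting of the doubled grid (interior-0 overwriting outline-1 cell by cell) with an order-independent per-cell classification (any-interior -> 0, else any-cover -> 1, else -1) and runs the BFS on a two-list current/next queue instead of a deque.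
-- outside the precondition, e.g. on solution([[-2, -2, -1, -1]], -2, -2, -1, -1): A returns 2, B returns None
import Mathlib
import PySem

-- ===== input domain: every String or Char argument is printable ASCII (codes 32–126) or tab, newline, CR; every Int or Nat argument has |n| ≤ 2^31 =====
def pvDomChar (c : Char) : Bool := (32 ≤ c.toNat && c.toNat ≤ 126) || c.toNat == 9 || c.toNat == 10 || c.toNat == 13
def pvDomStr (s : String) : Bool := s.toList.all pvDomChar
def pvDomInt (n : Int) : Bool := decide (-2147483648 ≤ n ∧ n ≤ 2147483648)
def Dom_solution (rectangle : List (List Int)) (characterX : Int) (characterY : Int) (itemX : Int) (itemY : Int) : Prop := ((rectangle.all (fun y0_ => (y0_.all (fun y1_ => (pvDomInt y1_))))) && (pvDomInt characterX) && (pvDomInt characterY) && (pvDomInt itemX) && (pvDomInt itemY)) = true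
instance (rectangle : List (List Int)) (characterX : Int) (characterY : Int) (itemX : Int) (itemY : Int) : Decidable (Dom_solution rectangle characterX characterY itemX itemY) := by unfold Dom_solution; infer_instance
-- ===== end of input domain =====

-- B builds the 102×102 grid by per-cell classification (any rectangle interior → 0, else any
-- rectangle cover → 1, else -1) instead of A's sequential per-rectangle area painting, and runs
-- the same BFS on a two-list (current/next) queue instead of one deque (objective: alternative).

-- Helpers shared by both ports: Python's graph[i][j] read / write (negative index counts from
-- the end), and the fuel constant.

-- graph[i][j] (read): exact where Python succeeds; the defaults are reached only where Python
-- raises IndexError, which Pre_solution excludes.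
def pvGet2 (g : List (List Int)) (i j : Int) : Int :=
  PySem.List.pyGetD (PySem.List.pyGetD g i []) j 0

-- graph[i][j] = v: exact where Python's assignment succeeds; a no-op where Python raises
-- IndexError (excluded by Pre_solution).
def pvSet2 (g : List (List Int)) (i j : Int) (v : Int) : List (List Int) :=
  let i' := (if i < 0 then i + g.length else i).toNat
  let row := g.getD i' []
  let j' := (if j < 0 then j + row.length else j).toNat
  g.set i' (row.set j' v)

-- fuel bound for Lean totality only (both ports share it; the equivalence below holds for every
-- fuel value); Python's while-loop is unbounded.
def pvFuel : Nat := 5000000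

-- ===== PORT A =====
def pvDx : List Int := [1, 0, -1, 0]
def pvDy : List Int := [0, 1, 0, -1]

-- the body of A's 'for r in rectangle' loop, after r1,c1,r2,c2 = map(lambda x:x*2, r)
def pvFillA (g : List (List Int)) (r1 c1 r2 c2 : Int) : List (List Int) :=
  (PySem.List.pyRange r1 (r2 + 1) 1).foldl (fun g i =>
    (PySem.List.pyRange c1 (c2 + 1) 1).foldl (fun g j =>
      if r1 < i ∧ i < r2 ∧ c1 < j ∧ j < c2 then pvSet2 g i j 0
      else if pvGet2 g i j ≠ 0 then pvSet2 g i j 1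
      else g) g) g

-- A's grid-building loop; none = the unpacking 'r1,c1,r2,c2 = …' raises (len(r) ≠ 4, outside Pre_)
def pvGridA (rectangle : List (List Int)) : Option (List (List Int)) :=
  rectangle.foldl (fun og r =>
    og.bind fun g =>
      match r.map (· * 2) with
      | [r1, c1, r2, c2] => some (pvFillA g r1 c1 r2 c2)
      | _ => none)
    (some ((List.range 102).map fun _ => (List.range 102).map fun _ => (-1 : Int)))

-- A's while-loop over the deque (state: queue, visited)
def pvBfsA (graph : List (List Int)) (itemX itemY : Int) :
    Nat → List (Int × Int × Int) → List (List Int) → Option Int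
  | 0, _, _ => none
  | fuel + 1, q, visited =>
    match q with
    | [] => none
    | (x, y, c) :: rest =>
      if x = itemX ∧ y = itemY then some (PySem.Int.floordiv c 2)
      else
        let visited' := pvSet2 visited x y 1
        let q' := (PySem.List.pyRange 0 4 1).foldl (fun q i =>
          if pvGet2 visited' (x + PySem.List.pyGetD pvDx i 0) (y + PySem.List.pyGetD pvDy i 0) = 0 ∧
             pvGet2 graph (x + PySem.List.pyGetD pvDx i 0) (y + PySem.List.pyGetD pvDy i 0) = 1 then
            q ++ [(x + PySem.List.pyGetD pvDx i 0, y + PySem.List.pyGetD pvDy i 0, c + 1)]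
          else q) rest
        pvBfsA graph itemX itemY fuel q' visited'

def solution (rectangle : List (List Int)) (characterX : Int) (characterY : Int) (itemX : Int) (itemY : Int) : Option Int :=
  match pvGridA rectangle with
  | none => none
  | some graph =>
    pvBfsA graph (itemX * 2) (itemY * 2) pvFuel
      [(characterX * 2, characterY * 2, 0)]
      ((List.range 102).map fun _ => (List.range 102).map fun _ => (0 : Int))

-- ===== PORT B =====
-- rects = [[v*2 for v in r] for r in rectangle], tupled; none = a row of length ≠ 4, on which
-- B's unpacking 'for r1, c1, r2, c2 in rects' raises (outside Pre_)
def pvRects2 (rectangle : List (List Int)) : Option (List (Int × Int × Int × Int)) :=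
  rectangle.foldr (fun r acc =>
    acc.bind fun l =>
      match r.map (· * 2) with
      | [r1, c1, r2, c2] => some ((r1, c1, r2, c2) :: l)
      | _ => none) (some [])

def pvCell (rects : List (Int × Int × Int × Int)) (i j : Int) : Int :=
  if rects.any (fun t => decide (t.1 < i ∧ i < t.2.2.1 ∧ t.2.1 < j ∧ j < t.2.2.2)) then 0
  else if rects.any (fun t => decide (t.1 ≤ i ∧ i ≤ t.2.2.1 ∧ t.2.1 ≤ j ∧ j ≤ t.2.2.2)) then 1
  else -1

def pvGridB (rectangle : List (List Int)) : Option (List (List Int)) :=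
  (pvRects2 rectangle).map fun rects =>
    (List.range 102).map fun (i : Nat) => (List.range 102).map fun (j : Nat) => pvCell rects (i : Int) (j : Int)

def pvDirs : List (Int × Int) := [(1, 0), (0, 1), (-1, 0), (0, -1)]

-- B's while-loop over the two-list queue (state: cur, nxt, visited)
def pvBfsB (graph : List (List Int)) (itemX itemY : Int) :
    Nat → List (Int × Int × Int) → List (Int × Int × Int) → List (List Int) → Option Int
  | 0, _, _, _ => none
  | fuel + 1, cur, nxt, visited =>
    match (if cur.isEmpty then (nxt, ([] : List (Int × Int × Int))) else (cur, nxt)) with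
    | (cur', nxt') =>
      match cur' with
      | [] => none
      | (x, y, c) :: rest =>
        if x = itemX ∧ y = itemY then some (PySem.Int.floordiv c 2)
        else
          let visited' := pvSet2 visited x y 1
          let nxt'' := pvDirs.foldl (fun nxt d =>
            if pvGet2 visited' (x + d.1) (y + d.2) = 0 ∧ pvGet2 graph (x + d.1) (y + d.2) = 1 then
              nxt ++ [(x + d.1, y + d.2, c + 1)]
            else nxt) nxt'
          pvBfsB graph itemX itemY fuel rest nxt'' visited'

def solution_alt (rectangle : List (List Int)) (characterX : Int) (characterY : Int) (itemX : Int) (itemY : Int) : Option Int :=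
  match pvGridB rectangle with
  | none => none
  | some graph =>
    pvBfsB graph (itemX * 2) (itemY * 2) pvFuel
      [(characterX * 2, characterY * 2, 0)] []
      ((List.range 102).map fun _ => (List.range 102).map fun _ => (0 : Int))

-- ===== PRECONDITION & SPEC =====
-- Pre_ admits rectangles of four coordinates that are on the board ([0,50]) or paint nothing
-- (empty row or column range), with the character on the board — or anywhere in [-50,50] when no
-- rectangle paints; the item needs no bound, it is only compared. Outside Pre_ A either raises
-- IndexError/ValueError or returns values produced by Python negative-index wraparound painting,
-- an artefact of A's grid fill.
def Pre_solution (rectangle : List (List Int)) (characterX : Int) (characterY : Int) (itemX : Int) (itemY : Int) : Prop :=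
  (∀ r ∈ rectangle, r.length = 4 ∧
    ((∀ v ∈ r, 0 ≤ v ∧ v ≤ 50) ∨ r.getD 2 0 < r.getD 0 0 ∨ r.getD 3 0 < r.getD 1 0)) ∧
  ((0 ≤ characterX ∧ characterX ≤ 50 ∧ 0 ≤ characterY ∧ characterY ≤ 50) ∨
   ((∀ r ∈ rectangle, r.getD 2 0 < r.getD 0 0 ∨ r.getD 3 0 < r.getD 1 0) ∧
    -50 ≤ characterX ∧ characterX ≤ 50 ∧ -50 ≤ characterY ∧ characterY ≤ 50))
instance (rectangle : List (List Int)) (characterX : Int) (characterY : Int) (itemX : Int) (itemY : Int) : Decidable (Pre_solution rectangle characterX characterY itemX itemY) := by unfold Pre_solution; infer_instance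

def pvWitness_solution : List (List Int) × Int × Int × Int × Int := ([[1, 1, 4, 4]], 1, 1, 4, 4)

def Spec_solution (rectangle : List (List Int)) (characterX : Int) (characterY : Int) (itemX : Int) (itemY : Int) (out : Option Int) : Prop := out = solution_alt rectangle characterX characterY itemX itemY
instance (rectangle : List (List Int)) (characterX : Int) (characterY : Int) (itemX : Int) (itemY : Int) (out : Option Int) : Decidable (Spec_solution rectangle characterX characterY itemX itemY out) := by unfold Spec_solution; infer_instance

-- ===== CLAIM (what is proved, stated in full; the proofs are below) =====
def Claim_equal_solution : Prop := ∀ (rectangle : List (List Int)) (characterX : Int) (characterY : Int) (itemX : Int) (itemY : Int), Dom_solution rectangle characterX characterY itemX itemY → Pre_solution rectangle characterX characterY itemX itemY → Spec_solution rectangle characterX characterY itemX itemY (solution rectangle characterX characterY itemX itemY)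

-- ===== LEMMAS AND PROOFS =====
def pk (g : List (List Int)) (i j : Nat) : Int := (g.getD i []).getD j 0

def Shape (g : List (List Int)) : Prop := g.length = 102 ∧ ∀ row ∈ g, row.length = 102

lemma getD_set_lt {α : Type} (l : List α) (n b : Nat) (v d : α) (hb : b < l.length) :
    (l.set n v).getD b d = if b = n then v else l.getD b d := by
  rw [List.getD_eq_getElem _ _ (by simpa using hb), List.getD_eq_getElem _ _ hb,
      List.getElem_set]
  split_ifs with h1 h2 h2 <;> first | rfl | omega

lemma rowlen {g : List (List Int)} (hg : Shape g) {a : Nat} (ha : a < 102) :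
    (g.getD a []).length = 102 := by
  obtain ⟨hlen, hrow⟩ := hg
  rw [List.getD_eq_getElem _ _ (by omega)]
  exact hrow _ (List.getElem_mem _)

lemma shape_set2 {g : List (List Int)} (hg : Shape g) {i : Int} (j v : Int)
    (hi0 : 0 ≤ i) (hi : i < 102) : Shape (pvSet2 g i j v) := by
  have hrl := rowlen hg (a := i.toNat) (by omega)
  obtain ⟨hlen, hrow⟩ := hg
  have hnot : ¬ i < 0 := by omega
  refine ⟨by simp [pvSet2, hlen], ?_⟩
  intro row hmem
  simp only [pvSet2, hnot, if_false] at hmem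
  rcases List.mem_or_eq_of_mem_set hmem with h | h
  · exact hrow _ h
  · rw [h, List.length_set]; exact hrl

lemma pk_set2 {g : List (List Int)} (hg : Shape g) {i j : Int} (hi0 : 0 ≤ i) (hi : i < 102)
    (hj0 : 0 ≤ j) (hj : j < 102) (v : Int) (a b : Nat) (ha : a < 102) (hb : b < 102) :
    pk (pvSet2 g i j v) a b = if (a : Int) = i ∧ (b : Int) = j then v else pk g a b := by
  have hrli := rowlen hg (a := i.toNat) (by omega)
  have hrla := rowlen hg ha
  have hlen := hg.1
  have hnoti : ¬ i < 0 := by omega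
  have hnotj : ¬ j < 0 := by omega
  simp only [pvSet2, hnoti, hnotj, if_false, pk]
  rw [getD_set_lt _ _ _ _ _ (by omega)]
  by_cases hai : a = i.toNat
  · rw [if_pos hai, hai, getD_set_lt _ _ _ _ _ (by omega)]
    by_cases hbj : b = j.toNat
    · rw [if_pos hbj, if_pos ⟨by omega, by omega⟩]
    · rw [if_neg hbj, if_neg (by omega)]
  · rw [if_neg hai, if_neg (by omega)]

lemma pvGet2_eq_pk (g : List (List Int)) {i j : Int} (hi0 : 0 ≤ i) (hj0 : 0 ≤ j) :
    pvGet2 g i j = pk g i.toNat j.toNat := by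
  rw [pvGet2, show i = ((i.toNat : Nat) : Int) from (Int.toNat_of_nonneg hi0).symm,
      show j = ((j.toNat : Nat) : Int) from (Int.toNat_of_nonneg hj0).symm,
      PySem.List.pyGetD_natCast, PySem.List.pyGetD_natCast, pk]
  simp [max_eq_left hi0, max_eq_left hj0]

def nv (r1 c1 r2 c2 i j v : Int) : Int :=
  if r1 < i ∧ i < r2 ∧ c1 < j ∧ j < c2 then 0 else if v ≠ 0 then 1 else v

lemma step_shape {g : List (List Int)} (hg : Shape g) (r1 c1 r2 c2 : Int) {i j : Int}
    (hi0 : 0 ≤ i) (hi : i < 102) :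
    Shape (if r1 < i ∧ i < r2 ∧ c1 < j ∧ j < c2 then pvSet2 g i j 0
           else if pvGet2 g i j ≠ 0 then pvSet2 g i j 1 else g) := by
  split_ifs <;> first | exact shape_set2 hg _ _ hi0 hi | exact hg

lemma step_pk {g : List (List Int)} (hg : Shape g) (r1 c1 r2 c2 : Int) {i j : Int}
    (hi0 : 0 ≤ i) (hi : i < 102) (hj0 : 0 ≤ j) (hj : j < 102)
    (a b : Nat) (ha : a < 102) (hb : b < 102) :
    pk (if r1 < i ∧ i < r2 ∧ c1 < j ∧ j < c2 then pvSet2 g i j 0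
        else if pvGet2 g i j ≠ 0 then pvSet2 g i j 1 else g) a b =
    if (a : Int) = i ∧ (b : Int) = j then nv r1 c1 r2 c2 i j (pk g a b) else pk g a b := by
  have hget := pvGet2_eq_pk g hi0 hj0
  by_cases hP : r1 < i ∧ i < r2 ∧ c1 < j ∧ j < c2
  · rw [if_pos hP, pk_set2 hg hi0 hi hj0 hj 0 a b ha hb]
    by_cases hij : (a : Int) = i ∧ (b : Int) = j
    · rw [if_pos hij, if_pos hij, nv, if_pos hP]
    · rw [if_neg hij, if_neg hij]
  · rw [if_neg hP]
    by_cases hz : pvGet2 g i j ≠ 0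
    · rw [if_pos hz, pk_set2 hg hi0 hi hj0 hj 1 a b ha hb]
      by_cases hij : (a : Int) = i ∧ (b : Int) = j
      · rw [if_pos hij, if_pos hij, nv, if_neg hP, if_pos ?hv]
        case hv =>
          rw [hget] at hz
          have : a = i.toNat ∧ b = j.toNat := by omega
          rwa [this.1, this.2]
      · rw [if_neg hij, if_neg hij]
    · rw [if_neg hz]
      by_cases hij : (a : Int) = i ∧ (b : Int) = j
      · rw [if_pos hij, nv, if_neg hP, if_neg ?hv]
        case hv =>
          rw [hget] at hz
          have : a = i.toNat ∧ b = j.toNat := by omega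
          rw [this.1, this.2]; simpa using hz
      · rw [if_neg hij]

lemma fill_inner (r1 c1 r2 c2 i : Int) (hi0 : 0 ≤ i) (hi : i < 102) (hc2 : c2 ≤ 100) :
    ∀ (n : Nat) (lo : Int), (c2 + 1 - lo).toNat ≤ n → 0 ≤ lo → ∀ (g : List (List Int)), Shape g →
      Shape ((PySem.List.pyRange lo (c2 + 1) 1).foldl (fun g j =>
        if r1 < i ∧ i < r2 ∧ c1 < j ∧ j < c2 then pvSet2 g i j 0
        else if pvGet2 g i j ≠ 0 then pvSet2 g i j 1
        else g) g) ∧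
      ∀ (a b : Nat), a < 102 → b < 102 →
        pk ((PySem.List.pyRange lo (c2 + 1) 1).foldl (fun g j =>
          if r1 < i ∧ i < r2 ∧ c1 < j ∧ j < c2 then pvSet2 g i j 0
          else if pvGet2 g i j ≠ 0 then pvSet2 g i j 1
          else g) g) a b =
        (if (a : Int) = i ∧ lo ≤ (b : Int) ∧ (b : Int) ≤ c2 then nv r1 c1 r2 c2 i b (pk g a b)
         else pk g a b) := by
  intro n
  induction n with
  | zero =>
    intro lo hn hlo g hg
    rw [PySem.List.pyRange_one_eq_nil (by omega), List.foldl_nil]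
    exact ⟨hg, fun a b ha hb => by rw [if_neg (by omega)]⟩
  | succ n ih =>
    intro lo hn hlo g hg
    by_cases hend : c2 + 1 ≤ lo
    · rw [PySem.List.pyRange_one_eq_nil (by omega), List.foldl_nil]
      exact ⟨hg, fun a b ha hb => by rw [if_neg (by omega)]⟩
    · rw [PySem.List.pyRange_one_cons (by omega), List.foldl_cons]
      have hstep_sh := step_shape hg r1 c1 r2 c2 (j := lo) hi0 hi
      obtain ⟨ih_sh, ih_pk⟩ := ih (lo + 1) (by omega) (by omega) _ hstep_sh
      refine ⟨ih_sh, fun a b ha hb => ?_⟩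
      rw [ih_pk a b ha hb, step_pk hg r1 c1 r2 c2 hi0 hi (by omega) (by omega) a b ha hb]
      by_cases hbl : (b : Int) = lo
      · by_cases hai : (a : Int) = i
        · rw [if_neg (by omega), if_pos ⟨hai, hbl⟩, if_pos (by omega), hbl]
        · rw [if_neg (by omega), if_neg (by simp [hai]), if_neg (by simp [hai])]
      · by_cases hmid : (a : Int) = i ∧ lo + 1 ≤ (b : Int) ∧ (b : Int) ≤ c2
        · rw [if_pos hmid, if_neg (by omega), if_pos (by omega)]
        · rw [if_neg hmid, if_neg (by omega), if_neg (by omega)]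

lemma fill_outer_aux (r1 c1 r2 c2 : Int) (hr2 : r2 ≤ 100) (hc1 : 0 ≤ c1) (hc2 : c2 ≤ 100) :
    ∀ (n : Nat) (lo : Int), (r2 + 1 - lo).toNat ≤ n → 0 ≤ lo → ∀ (g : List (List Int)), Shape g →
      Shape ((PySem.List.pyRange lo (r2 + 1) 1).foldl (fun g i =>
        (PySem.List.pyRange c1 (c2 + 1) 1).foldl (fun g j =>
          if r1 < i ∧ i < r2 ∧ c1 < j ∧ j < c2 then pvSet2 g i j 0
          else if pvGet2 g i j ≠ 0 then pvSet2 g i j 1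
          else g) g) g) ∧
      ∀ (a b : Nat), a < 102 → b < 102 →
        pk ((PySem.List.pyRange lo (r2 + 1) 1).foldl (fun g i =>
          (PySem.List.pyRange c1 (c2 + 1) 1).foldl (fun g j =>
            if r1 < i ∧ i < r2 ∧ c1 < j ∧ j < c2 then pvSet2 g i j 0
            else if pvGet2 g i j ≠ 0 then pvSet2 g i j 1
            else g) g) g) a b =
        (if lo ≤ (a : Int) ∧ (a : Int) ≤ r2 ∧ c1 ≤ (b : Int) ∧ (b : Int) ≤ c2 then
           nv r1 c1 r2 c2 a b (pk g a b)
         else pk g a b) := by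
  intro n
  induction n with
  | zero =>
    intro lo hn hlo g hg
    rw [PySem.List.pyRange_one_eq_nil (show r2 + 1 ≤ lo by omega), List.foldl_nil]
    exact ⟨hg, fun a b ha hb => by rw [if_neg (by omega)]⟩
  | succ n ih =>
    intro lo hn hlo g hg
    by_cases hend : r2 + 1 ≤ lo
    · rw [PySem.List.pyRange_one_eq_nil (show r2 + 1 ≤ lo by omega), List.foldl_nil]
      exact ⟨hg, fun a b ha hb => by rw [if_neg (by omega)]⟩
    · rw [PySem.List.pyRange_one_cons (show lo < r2 + 1 by omega), List.foldl_cons]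
      obtain ⟨row_sh, row_pk⟩ :=
        fill_inner r1 c1 r2 c2 lo hlo (by omega) hc2 (c2 + 1 - c1).toNat c1 le_rfl hc1 g hg
      obtain ⟨ih_sh, ih_pk⟩ := ih (lo + 1) (by omega) (by omega) _ row_sh
      refine ⟨ih_sh, fun a b ha hb => ?_⟩
      rw [ih_pk a b ha hb, row_pk a b ha hb]
      by_cases hal : (a : Int) = lo
      · by_cases hbc : c1 ≤ (b : Int) ∧ (b : Int) ≤ c2
        · rw [if_neg (by omega), if_pos ⟨hal, hbc.1, hbc.2⟩, if_pos (by omega), hal]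
        · rw [if_neg (by omega), if_neg (by omega), if_neg (by omega)]
      · by_cases hmid : lo + 1 ≤ (a : Int) ∧ (a : Int) ≤ r2 ∧ c1 ≤ (b : Int) ∧ (b : Int) ≤ c2
        · rw [if_pos hmid, if_neg (by omega), if_pos (by omega)]
        · rw [if_neg hmid, if_neg (by omega), if_neg (by omega)]

lemma fill_outer (r1 c1 r2 c2 : Int) (hr1 : 0 ≤ r1) (hr2 : r2 ≤ 100) (hc1 : 0 ≤ c1)
    (hc2 : c2 ≤ 100) (g : List (List Int)) (hg : Shape g) :
    Shape (pvFillA g r1 c1 r2 c2) ∧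
    ∀ (a b : Nat), a < 102 → b < 102 →
      pk (pvFillA g r1 c1 r2 c2) a b =
      (if r1 ≤ (a : Int) ∧ (a : Int) ≤ r2 ∧ c1 ≤ (b : Int) ∧ (b : Int) ≤ c2 then
         nv r1 c1 r2 c2 a b (pk g a b)
       else pk g a b) :=
  fill_outer_aux r1 c1 r2 c2 hr2 hc1 hc2 (r2 + 1 - r1).toNat r1 le_rfl hr1 g hg

def classify (rects : List (Int × Int × Int × Int)) (i j v : Int) : Int :=
  rects.foldl (fun v t =>
    if t.1 ≤ i ∧ i ≤ t.2.2.1 ∧ t.2.1 ≤ j ∧ j ≤ t.2.2.2 then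
      nv t.1 t.2.1 t.2.2.1 t.2.2.2 i j v
    else v) v

lemma classify_zero (rects : List (Int × Int × Int × Int)) (i j : Int) :
    classify rects i j 0 = 0 := by
  induction rects with
  | nil => rfl
  | cons t rest ih =>
    rw [classify, List.foldl_cons]
    have : (if t.1 ≤ i ∧ i ≤ t.2.2.1 ∧ t.2.1 ≤ j ∧ j ≤ t.2.2.2 then
        nv t.1 t.2.1 t.2.2.1 t.2.2.2 i j 0 else 0) = 0 := by
      rw [nv]; split_ifs <;> simp_all
    rw [this]; exact ih

lemma classify_ne_zero (rects : List (Int × Int × Int × Int)) (i j : Int) :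
    ∀ s : Int, s ≠ 0 →
    classify rects i j s =
      if rects.any (fun t => decide (t.1 < i ∧ i < t.2.2.1 ∧ t.2.1 < j ∧ j < t.2.2.2)) then 0
      else if rects.any (fun t => decide (t.1 ≤ i ∧ i ≤ t.2.2.1 ∧ t.2.1 ≤ j ∧ j ≤ t.2.2.2)) then 1
      else s := by
  induction rects with
  | nil => intro s hs; simp [classify]
  | cons t rest ih =>
    intro s hs
    rw [classify, List.foldl_cons, List.any_cons, List.any_cons]
    by_cases hI : t.1 < i ∧ i < t.2.2.1 ∧ t.2.1 < j ∧ j < t.2.2.2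
    · have hC : t.1 ≤ i ∧ i ≤ t.2.2.1 ∧ t.2.1 ≤ j ∧ j ≤ t.2.2.2 := by omega
      rw [if_pos hC, nv, if_pos hI]
      have h0 : classify rest i j 0 = 0 := classify_zero rest i j
      rw [show (List.foldl _ 0 rest : Int) = classify rest i j 0 from rfl, h0,
          decide_eq_true_eq.mpr hI, Bool.true_or, if_pos rfl]
    · by_cases hC : t.1 ≤ i ∧ i ≤ t.2.2.1 ∧ t.2.1 ≤ j ∧ j ≤ t.2.2.2
      · rw [if_pos hC, nv, if_neg hI, if_pos hs,
            show (List.foldl _ 1 rest : Int) = classify rest i j 1 from rfl, ih 1 one_ne_zero,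
            decide_eq_false hI, decide_eq_true_eq.mpr hC, Bool.false_or, Bool.true_or]
        clear ih
        split_ifs with h1 h2 <;> simp_all
      · rw [if_neg hC,
            show (List.foldl _ s rest : Int) = classify rest i j s from rfl, ih s hs,
            decide_eq_false hI, decide_eq_false hC, Bool.false_or, Bool.false_or]

lemma classify_eq_cell (rects : List (Int × Int × Int × Int)) (i j : Int) :
    classify rects i j (-1) = pvCell rects i j := by
  rw [classify_ne_zero rects i j (-1) (by norm_num), pvCell]

def GoodT (t : Int × Int × Int × Int) : Prop :=
  (0 ≤ t.1 ∧ t.1 ≤ 100 ∧ 0 ≤ t.2.1 ∧ t.2.1 ≤ 100 ∧ 0 ≤ t.2.2.1 ∧ t.2.2.1 ≤ 100 ∧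
   0 ≤ t.2.2.2 ∧ t.2.2.2 ≤ 100) ∨ t.2.2.1 < t.1 ∨ t.2.2.2 < t.2.1

lemma fill_inert (g : List (List Int)) (r1 c1 r2 c2 : Int)
    (h : r2 < r1 ∨ c2 < c1) : pvFillA g r1 c1 r2 c2 = g := by
  rcases h with h | h
  · rw [pvFillA, PySem.List.pyRange_one_eq_nil (show r2 + 1 ≤ r1 by omega), List.foldl_nil]
  · rw [pvFillA]
    have hinner : ∀ (g' : List (List Int)) (i : Int),
        (PySem.List.pyRange c1 (c2 + 1) 1).foldl (fun g j =>
          if r1 < i ∧ i < r2 ∧ c1 < j ∧ j < c2 then pvSet2 g i j 0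
          else if pvGet2 g i j ≠ 0 then pvSet2 g i j 1
          else g) g' = g' := fun g' i => by
      rw [PySem.List.pyRange_one_eq_nil (show c2 + 1 ≤ c1 by omega), List.foldl_nil]
    generalize (PySem.List.pyRange r1 (r2 + 1) 1) = L
    induction L generalizing g with
    | nil => rfl
    | cons x xs ih => rw [List.foldl_cons, hinner g x]; exact ih g

lemma fold_fill (rects : List (Int × Int × Int × Int)) (hgood : ∀ t ∈ rects, GoodT t) :
    ∀ (g : List (List Int)), Shape g →
      Shape (rects.foldl (fun g t => pvFillA g t.1 t.2.1 t.2.2.1 t.2.2.2) g) ∧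
      ∀ (a b : Nat), a < 102 → b < 102 →
        pk (rects.foldl (fun g t => pvFillA g t.1 t.2.1 t.2.2.1 t.2.2.2) g) a b =
        classify rects a b (pk g a b) := by
  induction rects with
  | nil => exact fun g hg => ⟨hg, fun a b ha hb => rfl⟩
  | cons t rest ih =>
    intro g hg
    rcases hgood t List.mem_cons_self with ⟨h1, h2, h3, h4, h5, h6, h7, h8⟩ | hinert
    · obtain ⟨fill_sh, fill_pk⟩ := fill_outer t.1 t.2.1 t.2.2.1 t.2.2.2 h1 h6 h3 h8 g hg
      rw [List.foldl_cons]
      obtain ⟨f_sh, f_pk⟩ := ih (fun u hu => hgood u (List.mem_cons_of_mem _ hu)) _ fill_sh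
      refine ⟨f_sh, fun a b ha hb => ?_⟩
      rw [f_pk a b ha hb, fill_pk a b ha hb]
      rfl
    · rw [List.foldl_cons, fill_inert g t.1 t.2.1 t.2.2.1 t.2.2.2 hinert]
      obtain ⟨f_sh, f_pk⟩ := ih (fun u hu => hgood u (List.mem_cons_of_mem _ hu)) g hg
      refine ⟨f_sh, fun a b ha hb => ?_⟩
      rw [f_pk a b ha hb]
      show _ = classify rest _ _ (if t.1 ≤ (a : Int) ∧ (a : Int) ≤ t.2.2.1 ∧
        t.2.1 ≤ (b : Int) ∧ (b : Int) ≤ t.2.2.2 then _ else _)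
      rw [if_neg (by omega)]

lemma g0_shape : Shape ((List.range 102).map fun _ => (List.range 102).map fun _ => (-1 : Int)) := by
  constructor
  · simp
  · intro row hrow
    simp only [List.mem_map] at hrow
    obtain ⟨_, _, rfl⟩ := hrow
    simp

lemma g0_pk (a b : Nat) (ha : a < 102) (hb : b < 102) :
    pk ((List.range 102).map fun _ => (List.range 102).map fun _ => (-1 : Int)) a b = -1 := by
  have h1 : ((List.range 102).map fun _ => (List.range 102).map fun _ => (-1 : Int)).getD a []
      = (List.range 102).map fun _ => (-1 : Int) := by
    rw [List.getD_eq_getElem _ _ (by rw [List.length_map, List.length_range]; exact ha),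
        List.getElem_map]
  rw [pk, h1,
      List.getD_eq_getElem _ _ (by rw [List.length_map, List.length_range]; exact hb),
      List.getElem_map]

lemma gridA_eq_fold (rectangle : List (List Int))
    (hre : ∀ r ∈ rectangle, r.length = 4 ∧
      ((∀ v ∈ r, 0 ≤ v ∧ v ≤ 50) ∨ r.getD 2 0 < r.getD 0 0 ∨ r.getD 3 0 < r.getD 1 0)) :
    ∀ g : List (List Int),
      rectangle.foldl (fun og r =>
        og.bind fun g =>
          match r.map (· * 2) with
          | [r1, c1, r2, c2] => some (pvFillA g r1 c1 r2 c2)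
          | _ => none) (some g) =
      (pvRects2 rectangle).map
        (fun L => L.foldl (fun g t => pvFillA g t.1 t.2.1 t.2.2.1 t.2.2.2) g) := by
  induction rectangle with
  | nil => intro g; rfl
  | cons r rest ih =>
    intro g
    obtain ⟨hlen, hval⟩ := hre r List.mem_cons_self
    obtain ⟨a, b, c, d, rfl⟩ : ∃ a b c d, r = [a, b, c, d] := by
      match r, hlen with
      | [a, b, c, d], _ => exact ⟨a, b, c, d, rfl⟩
    rw [List.foldl_cons]
    have ih' := ih (fun u hu => hre u (List.mem_cons_of_mem _ hu))
    show rest.foldl _ (some (pvFillA g (a*2) (b*2) (c*2) (d*2))) = _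
    rw [ih' (pvFillA g (a*2) (b*2) (c*2) (d*2))]
    rw [show pvRects2 ([a, b, c, d] :: rest)
          = ((pvRects2 rest).bind fun l => some ((a*2, b*2, c*2, d*2) :: l)) from rfl]
    cases h : pvRects2 rest with
    | none => rfl
    | some L => rfl

lemma rects2_good (rectangle : List (List Int))
    (hre : ∀ r ∈ rectangle, r.length = 4 ∧
      ((∀ v ∈ r, 0 ≤ v ∧ v ≤ 50) ∨ r.getD 2 0 < r.getD 0 0 ∨ r.getD 3 0 < r.getD 1 0)) :
    ∃ L, pvRects2 rectangle = some L ∧ ∀ t ∈ L, GoodT t := by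
  induction rectangle with
  | nil => exact ⟨[], rfl, by simp⟩
  | cons r rest ih =>
    obtain ⟨L, hL, hgood⟩ := ih (fun u hu => hre u (List.mem_cons_of_mem _ hu))
    obtain ⟨hlen, hval⟩ := hre r List.mem_cons_self
    obtain ⟨a, b, c, d, rfl⟩ : ∃ a b c d, r = [a, b, c, d] := by
      match r, hlen with
      | [a, b, c, d], _ => exact ⟨a, b, c, d, rfl⟩
    refine ⟨(a*2, b*2, c*2, d*2) :: L, ?_, ?_⟩
    · rw [show pvRects2 ([a, b, c, d] :: rest)
            = ((pvRects2 rest).bind fun l => some ((a*2, b*2, c*2, d*2) :: l)) from rfl, hL]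
      rfl
    · intro t ht
      rcases List.mem_cons.mp ht with rfl | ht
      · rcases hval with hval | hinert
        · have ha := hval a (by simp); have hb := hval b (by simp)
          have hc := hval c (by simp); have hd := hval d (by simp)
          exact Or.inl (by refine ⟨?_, ?_, ?_, ?_, ?_, ?_, ?_, ?_⟩ <;> dsimp only <;> omega)
        · rw [show ([a, b, c, d] : List Int).getD 2 0 = c from rfl,
              show ([a, b, c, d] : List Int).getD 0 0 = a from rfl,
              show ([a, b, c, d] : List Int).getD 3 0 = d from rfl,
              show ([a, b, c, d] : List Int).getD 1 0 = b from rfl] at hinert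
          exact Or.inr (by dsimp only; omega)
      · exact hgood t ht

lemma grids_eq (rectangle : List (List Int))
    (hre : ∀ r ∈ rectangle, r.length = 4 ∧
      ((∀ v ∈ r, 0 ≤ v ∧ v ≤ 50) ∨ r.getD 2 0 < r.getD 0 0 ∨ r.getD 3 0 < r.getD 1 0)) :
    pvGridA rectangle = pvGridB rectangle := by
  obtain ⟨L, hL, hgood⟩ := rects2_good rectangle hre
  rw [pvGridA, gridA_eq_fold rectangle hre, pvGridB, hL, Option.map_some, Option.map_some]
  congr 1
  obtain ⟨sh, hpk⟩ := fold_fill L hgood _ g0_shape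
  apply List.ext_getElem
  · rw [sh.1]; simp
  · intro a h1 h2
    apply List.ext_getElem
    · have : _ ∈ _ := List.getElem_mem h1
      rw [sh.2 _ this]
      simp
    · intro b hb1 hb2
      have ha : a < 102 := by rw [sh.1] at h1; exact h1
      have hbl : b < 102 := by
        have : _ ∈ _ := List.getElem_mem h1
        rw [sh.2 _ this] at hb1; exact hb1
      have e1 : (L.foldl (fun g t => pvFillA g t.1 t.2.1 t.2.2.1 t.2.2.2)
          ((List.range 102).map fun _ => (List.range 102).map fun _ => (-1 : Int)))[a][b]'hb1 =
          pk (L.foldl (fun g t => pvFillA g t.1 t.2.1 t.2.2.1 t.2.2.2)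
          ((List.range 102).map fun _ => (List.range 102).map fun _ => (-1 : Int))) a b := by
        rw [pk, List.getD_eq_getElem _ _ h1, List.getD_eq_getElem _ _ hb1]
      rw [e1, hpk a b ha hbl, g0_pk a b ha hbl, classify_eq_cell]
      simp only [List.getElem_map, List.getElem_range]

lemma children_shift (graph visited : List (List Int)) (x y c : Int)
    (L : List (Int × Int)) :
    ∀ (acc extra : List (Int × Int × Int)),
    L.foldl (fun nxt d =>
      if pvGet2 visited (x + d.1) (y + d.2) = 0 ∧ pvGet2 graph (x + d.1) (y + d.2) = 1 then
        nxt ++ [(x + d.1, y + d.2, c + 1)]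
      else nxt) (acc ++ extra) =
    acc ++ L.foldl (fun nxt d =>
      if pvGet2 visited (x + d.1) (y + d.2) = 0 ∧ pvGet2 graph (x + d.1) (y + d.2) = 1 then
        nxt ++ [(x + d.1, y + d.2, c + 1)]
      else nxt) extra := by
  induction L with
  | nil => intro acc extra; rfl
  | cons d rest ih =>
    intro acc extra
    rw [List.foldl_cons, List.foldl_cons]
    by_cases h : pvGet2 visited (x + d.1) (y + d.2) = 0 ∧ pvGet2 graph (x + d.1) (y + d.2) = 1
    · rw [if_pos h, if_pos h, List.append_assoc]
      exact ih acc (extra ++ [(x + d.1, y + d.2, c + 1)])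
    · rw [if_neg h, if_neg h]
      exact ih acc extra

lemma children_eq (graph visited : List (List Int)) (x y c : Int)
    (acc : List (Int × Int × Int)) :
    (PySem.List.pyRange 0 4 1).foldl (fun q i =>
      if pvGet2 visited (x + PySem.List.pyGetD pvDx i 0) (y + PySem.List.pyGetD pvDy i 0) = 0 ∧
         pvGet2 graph (x + PySem.List.pyGetD pvDx i 0) (y + PySem.List.pyGetD pvDy i 0) = 1 then
        q ++ [(x + PySem.List.pyGetD pvDx i 0, y + PySem.List.pyGetD pvDy i 0, c + 1)]
      else q) acc =
    pvDirs.foldl (fun nxt d =>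
      if pvGet2 visited (x + d.1) (y + d.2) = 0 ∧ pvGet2 graph (x + d.1) (y + d.2) = 1 then
        nxt ++ [(x + d.1, y + d.2, c + 1)]
      else nxt) acc := by
  rw [show PySem.List.pyRange 0 4 1 = [0, 1, 2, 3] by decide]
  rfl

lemma bfs_eq (graph : List (List Int)) (ix iy : Int) :
    ∀ (fuel : Nat) (cur nxt : List (Int × Int × Int)) (visited : List (List Int)),
      pvBfsA graph ix iy fuel (cur ++ nxt) visited = pvBfsB graph ix iy fuel cur nxt visited := by
  intro fuel
  induction fuel with
  | zero => intro cur nxt visited; rfl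
  | succ f ih =>
    intro cur nxt visited
    cases cur with
    | nil =>
      cases nxt with
      | nil => rfl
      | cons hd t =>
        obtain ⟨x, y, c⟩ := hd
        show pvBfsA graph ix iy (f + 1) ((x, y, c) :: t) visited = _
        rw [pvBfsA, pvBfsB]
        simp only [List.isEmpty_nil, if_true]
        by_cases hit : x = ix ∧ y = iy
        · rw [if_pos hit, if_pos hit]
        · rw [if_neg hit, if_neg hit]
          rw [children_eq graph (pvSet2 visited x y 1) x y c t]
          have hsplit := children_shift graph (pvSet2 visited x y 1) x y c pvDirs t []
          rw [List.append_nil] at hsplit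
          rw [hsplit]
          exact ih t _ _
    | cons hd t =>
      obtain ⟨x, y, c⟩ := hd
      rw [List.cons_append, pvBfsA, pvBfsB]
      simp only [List.isEmpty_cons, Bool.false_eq_true, if_false]
      by_cases hit : x = ix ∧ y = iy
      · rw [if_pos hit, if_pos hit]
      · rw [if_neg hit, if_neg hit]
        rw [children_eq graph (pvSet2 visited x y 1) x y c (t ++ nxt)]
        rw [children_shift graph (pvSet2 visited x y 1) x y c pvDirs t nxt]
        exact ih t _ _

-- ===== VERDICT (by name: the statement is the Claim_ definition above) =====
theorem solution_spec : Claim_equal_solution := by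
  intro rectangle characterX characterY itemX itemY _ hpre
  unfold Spec_solution solution solution_alt
  rw [grids_eq rectangle hpre.1]
  cases h : pvGridB rectangle with
  | none => rfl
  | some graph =>
    exact bfs_eq graph (itemX * 2) (itemY * 2) pvFuel
      [(characterX * 2, characterY * 2, 0)] [] _
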